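-- pv_equiv track=rewrite | github.com/kauanweslley/logica | 1INFO2-avaliacao5-KauanWeslley.py | divisivel_por_7_e_9
-- ===== SOURCE A (Python) =====
-- def divisivel_por_7_e_9(n=1):
--     '''
--     param n: valor inteiro. Se não for informado nenhum valor, assume-se 1
--     return: um inteiro, representando o n-ésimo número divisível por 7 e 9
--
--     Quais é o n-ésimo número divisível por 7 e 9?
--     '''
--     par7_par9 = 0
--     contador = 0
--     while contador <= n:
--         if par7_par9 % 9 == 0 and par7_par9 % 7 == 0:
--             contador += 1
--         if contador > n:
--             return par7_par9
--         else:
--             par7_par9 += 1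
-- ===== SOURCE B (Python) =====
-- def divisivel_por_7_e_9(n=1):
--     # closed form: the n-th number divisible by both 7 and 9 is n * lcm(7, 9)
--     return 63 * n
-- ===== Notes on version B (the rewrite author's own statement) =====
-- stated objective: faster
-- what changed: Replaces the O(n) counting loop over all integers with the closed form 63*n (lcm(7,9)=63).
-- outside the precondition, e.g. on divisivel_por_7_e_9(-1): A returns None, B returns -63
import Mathlib
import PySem

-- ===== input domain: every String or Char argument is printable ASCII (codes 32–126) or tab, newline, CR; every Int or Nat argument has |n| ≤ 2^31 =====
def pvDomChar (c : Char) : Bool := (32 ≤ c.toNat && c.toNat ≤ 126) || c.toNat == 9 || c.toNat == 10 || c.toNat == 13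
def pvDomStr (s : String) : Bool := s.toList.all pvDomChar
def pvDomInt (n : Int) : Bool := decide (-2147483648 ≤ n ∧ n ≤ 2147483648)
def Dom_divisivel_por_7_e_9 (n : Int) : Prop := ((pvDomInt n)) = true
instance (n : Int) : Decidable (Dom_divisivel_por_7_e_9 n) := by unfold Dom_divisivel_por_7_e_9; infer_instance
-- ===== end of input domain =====

-- B replaces A's one-by-one counting loop with the closed form 63*n (faster, asymptotic);
-- Pre_ excludes n < 0, where A returns None (no int value).


-- ===== PORT A =====
-- A's while-loop, transliterated with a fuel argument that only makes the loop total
-- (fuel is chosen large enough to never run out when n ≥ 0; returns 0 if it does).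
def pvALoop (fuel : Nat) (n par7_par9 contador : Int) : Int :=
  match fuel with
  | 0 => 0
  | fuel + 1 =>
    if contador ≤ n then
      let contador' := if par7_par9 % 9 = 0 ∧ par7_par9 % 7 = 0 then contador + 1 else contador
      if contador' > n then par7_par9
      else pvALoop fuel n (par7_par9 + 1) contador'
    else 0  -- Python falls off the loop and returns None (only when n < 0; outside Pre_)

def divisivel_por_7_e_9 (n : Int) : Int :=
  pvALoop (63 * n.toNat + 64) n 0 0

-- ===== PORT B =====
def divisivel_por_7_e_9_alt (n : Int) : Int := 63 * n

-- ===== PRECONDITION & SPEC =====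
-- Pre_ excludes n < 0: there A's loop body never runs and Python returns None, not an int.
def Pre_divisivel_por_7_e_9 (n : Int) : Prop := 0 ≤ n
instance (n : Int) : Decidable (Pre_divisivel_por_7_e_9 n) := by unfold Pre_divisivel_por_7_e_9; infer_instance
def pvWitness_divisivel_por_7_e_9 : Int := 1

def Spec_divisivel_por_7_e_9 (n : Int) (out : Int) : Prop := out = divisivel_por_7_e_9_alt n
instance (n : Int) (out : Int) : Decidable (Spec_divisivel_por_7_e_9 n out) := by unfold Spec_divisivel_por_7_e_9; infer_instance

-- ===== CLAIM (what is proved, stated in full; the proofs are below) =====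
def Claim_equal_divisivel_por_7_e_9 : Prop := ∀ (n : Int), Dom_divisivel_por_7_e_9 n → Pre_divisivel_por_7_e_9 n → Spec_divisivel_por_7_e_9 n (divisivel_por_7_e_9 n)

-- ===== LEMMAS AND PROOFS =====

-- Loop invariant: at the top of the loop, contador = ⌈par/63⌉ ≤ n; with enough fuel the
-- loop returns 63*n.
theorem pvALoop_inv (fuel : Nat) : ∀ (n par c : Int),
    0 ≤ par → 63 * c - 62 ≤ par → par ≤ 63 * c → c ≤ n →
    (63 * n - par).toNat < fuel →
    pvALoop fuel n par c = 63 * n := by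
  induction fuel with
  | zero => intro n par c _ _ _ _ hf; omega
  | succ fuel ih =>
    intro n par c hpar h1 h2 hc hf
    unfold pvALoop
    have hcle : c ≤ n := hc
    simp only [if_pos hcle]
    by_cases hdiv : par % 9 = 0 ∧ par % 7 = 0
    · -- par is a multiple of 63, hence par = 63*c
      have hpar63 : par = 63 * c := by omega
      simp only [if_pos hdiv]
      by_cases hgt : c + 1 > n
      · have : c = n := by omega
        simp only [if_pos hgt]
        omega
      · simp only [if_neg hgt]
        exact ih n (par + 1) (c + 1) (by omega) (by omega) (by omega) (by omega) (by omega)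
    · -- par is not a multiple of 63, hence par < 63*c
      have hne : par ≠ 63 * c := by omega
      simp only [if_neg hdiv]
      have hgt : ¬ (c > n) := by omega
      simp only [if_neg hgt]
      exact ih n (par + 1) c (by omega) (by omega) (by omega) (by omega) (by omega)

-- ===== VERDICT (by name: the statement is the Claim_ definition above) =====
theorem divisivel_por_7_e_9_spec : Claim_equal_divisivel_por_7_e_9 := by
  intro n _ hpre
  unfold Spec_divisivel_por_7_e_9 divisivel_por_7_e_9 divisivel_por_7_e_9_alt
  have hpre' : (0:Int) ≤ n := hpre
  exact pvALoop_inv (63 * n.toNat + 64) n 0 0 (by omega) (by omega) (by omega) (by omega) (by omega)
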